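-- pv_equiv track=rewrite | github.com/evtodorov/MLCMS | Exercise_1/dijkstra.py | is_str_neigh
-- ===== SOURCE A (Python) =====
-- def is_str_neigh(i, j, p_list, neigh):
--     """
--     For a set of two tuples i and j we need to see if j is a von Neumann neighbour of i
--
--     :param i: (tuple)
--     One of the tuples to check if there is a neighbourhood between i and j
--     :param j: (tuple)
--     One of the tuples to check if there is a neighbourhood between i and j
--     :param p_list: (list)
--     It is a list of ID used to locate each tuple in the grid.
--     :param neigh: (list)
--     It is the list of neighbours in which we check the given tuple is a neighbour
--
--     """
--     row_cmp = p_list[i]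
--     col_cmp = p_list[j]
--
--     neigh_list = [(row_cmp[0] + x[0], row_cmp[1] + x[1]) for x in neigh]
--     if col_cmp in neigh_list:
--         return True
--     else:
--         return False
-- ===== SOURCE B (Python) =====
-- def is_str_neigh(i, j, p_list, neigh):
--     row = p_list[i]
--     col = p_list[j]
--
--     def scan(k):
--         # recursive early-exit scan of the offsets: no intermediate list is built
--         if k == len(neigh):
--             return False
--         dx, dy = neigh[k]
--         if row[0] + dx == col[0] and row[1] + dy == col[1]:
--             return True
--         return scan(k + 1)
--
--     return scan(0)
-- ===== Notes on version B (the rewrite author's own statement) =====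
-- stated objective: alternative
-- what changed: A stages two passes (build the full list of shifted neighbour positions, then a membership test); B replaces them with one recursive early-exit scan over the offsets that compares both coordinates in place and builds no intermediate list.
import Mathlib
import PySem

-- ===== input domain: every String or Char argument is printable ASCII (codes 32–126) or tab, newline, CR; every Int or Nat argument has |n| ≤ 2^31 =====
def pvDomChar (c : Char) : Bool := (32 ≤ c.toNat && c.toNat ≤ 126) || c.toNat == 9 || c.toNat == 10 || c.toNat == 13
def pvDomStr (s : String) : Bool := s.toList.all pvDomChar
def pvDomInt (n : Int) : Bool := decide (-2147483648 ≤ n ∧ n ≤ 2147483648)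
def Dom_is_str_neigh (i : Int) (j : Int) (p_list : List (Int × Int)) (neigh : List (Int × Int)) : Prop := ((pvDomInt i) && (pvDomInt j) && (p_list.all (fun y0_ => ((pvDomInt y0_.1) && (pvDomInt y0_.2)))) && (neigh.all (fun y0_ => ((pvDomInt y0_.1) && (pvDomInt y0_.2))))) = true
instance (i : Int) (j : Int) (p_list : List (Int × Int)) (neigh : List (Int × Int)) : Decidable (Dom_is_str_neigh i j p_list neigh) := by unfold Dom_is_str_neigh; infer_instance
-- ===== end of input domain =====

-- B replaces A's staged build-shifted-list-then-membership-test with one recursive early-exit scan of the offsets (alternative decomposition).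

-- ===== PORT A =====
def is_str_neigh (i : Int) (j : Int) (p_list : List (Int × Int)) (neigh : List (Int × Int)) : Bool :=
  match PySem.List.pyGet? p_list i, PySem.List.pyGet? p_list j with
  | some row_cmp, some col_cmp =>
      let neigh_list := neigh.map (fun x => (row_cmp.1 + x.1, row_cmp.2 + x.2))
      if col_cmp ∈ neigh_list then true else false
  | _, _ => false  -- IndexError in Python; excluded by Pre_

-- ===== PORT B =====
-- B's recursive scan(k) over indices, ported as structural recursion on the remaining offsets
def scanNeigh (row col : Int × Int) : List (Int × Int) → Bool
  | [] => false
  | d :: rest =>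
      if row.1 + d.1 = col.1 ∧ row.2 + d.2 = col.2 then true else scanNeigh row col rest

def is_str_neigh_alt (i : Int) (j : Int) (p_list : List (Int × Int)) (neigh : List (Int × Int)) : Bool :=
  match PySem.List.pyGet? p_list i with
  | none => false  -- IndexError in Python; excluded by Pre_
  | some row =>
    match PySem.List.pyGet? p_list j with
    | none => false  -- IndexError in Python; excluded by Pre_
    | some col => scanNeigh row col neigh

-- ===== PRECONDITION & SPEC =====
-- Pre_ excludes exactly the inputs where the Python p_list[i] / p_list[j] raise IndexError.
def Pre_is_str_neigh (i : Int) (j : Int) (p_list : List (Int × Int)) (neigh : List (Int × Int)) : Prop :=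
  PySem.Raise.InRange p_list.length i ∧ PySem.Raise.InRange p_list.length j
instance (i : Int) (j : Int) (p_list : List (Int × Int)) (neigh : List (Int × Int)) : Decidable (Pre_is_str_neigh i j p_list neigh) := by unfold Pre_is_str_neigh; infer_instance

def pvWitness_is_str_neigh : Int × Int × (List (Int × Int)) × (List (Int × Int)) :=
  (0, 1, [(0, 0), (0, 1)], [(0, 1), (0, -1), (1, 0), (-1, 0)])

def Spec_is_str_neigh (i : Int) (j : Int) (p_list : List (Int × Int)) (neigh : List (Int × Int)) (out : Bool) : Prop := out = is_str_neigh_alt i j p_list neigh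
instance (i : Int) (j : Int) (p_list : List (Int × Int)) (neigh : List (Int × Int)) (out : Bool) : Decidable (Spec_is_str_neigh i j p_list neigh out) := by unfold Spec_is_str_neigh; infer_instance

-- ===== CLAIM =====
def Claim_equal_is_str_neigh : Prop := ∀ (i : Int) (j : Int) (p_list : List (Int × Int)) (neigh : List (Int × Int)), Dom_is_str_neigh i j p_list neigh → Pre_is_str_neigh i j p_list neigh → Spec_is_str_neigh i j p_list neigh (is_str_neigh i j p_list neigh)

-- ===== LEMMAS AND PROOFS =====
theorem scanNeigh_eq_mem (r c : Int × Int) (neigh : List (Int × Int)) :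
    scanNeigh r c neigh = decide (c ∈ neigh.map (fun x => (r.1 + x.1, r.2 + x.2))) := by
  induction neigh with
  | nil => simp [scanNeigh]
  | cons d rest ih =>
      simp only [scanNeigh, List.map_cons, List.mem_cons, ih]
      by_cases h : r.1 + d.1 = c.1 ∧ r.2 + d.2 = c.2
      · simp [h, Prod.ext_iff]
      · have : ¬ c = (r.1 + d.1, r.2 + d.2) := by
          intro hc; exact h ⟨by simp [hc], by simp [hc]⟩
        simp [h, this]

-- ===== VERDICT =====
theorem is_str_neigh_spec : Claim_equal_is_str_neigh := by
  intro i j p_list neigh _ _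
  unfold Spec_is_str_neigh is_str_neigh is_str_neigh_alt
  cases hri : PySem.List.pyGet? p_list i <;> cases hrj : PySem.List.pyGet? p_list j
  case some.some r c =>
    simp only [scanNeigh_eq_mem]
    split_ifs with h
    · simp [h]
    · simp [h]
  all_goals rfl
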